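-- pv_equiv track=rewrite | github.com/ericzhang98/competitive | codejam/2020/qual/slow_e.py | solution
-- ===== SOURCE A (Python) =====
-- import itertools
-- import collections
--
-- def matrix_to_str(mat):
--     l = []
--     for row in mat:
--         l.append(" ".join(map(str,row)))
--     return "\n".join(l)
--
-- def solution(*args):
--     N, K = args
--
--     seen = collections.defaultdict(set)
--     mat = [[0]*N for _ in range(N)]
--     def dfs(i):
--         if i == N:
--             trace = sum(mat[i][i] for i in range(N))
--             return trace == K
--
--         for perm in itertools.permutations(list(range(1,N+1))):
--             if all(perm[j] not in seen[j] for j in range(N)):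
--                 for j in range(N):
--                     seen[j].add(perm[j])
--                     mat[i][j] = perm[j]
--                 if dfs(i+1): return True
--                 for j in range(N):
--                     seen[j].remove(perm[j])
--                     mat[i][j] = 0
--
--     if dfs(0):
--         return "POSSIBLE\n" + matrix_to_str(mat)
--     else:
--         return "IMPOSSIBLE"
-- ===== SOURCE B (Python) =====
-- def solution(*args):
--     N, K = args
--
--     vals = list(range(1, N + 1))
--
--     def gen_rows(j, avail, cols):
--         # all rows that use each remaining value once, with row[j] avoiding
--         # cols[j], in lexicographic order (col-constraints pruned as we build)
--         if not avail:
--             yield []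
--             return
--         for idx, v in enumerate(avail):
--             if v not in cols[j]:
--                 for rest in gen_rows(j + 1, avail[:idx] + avail[idx + 1:], cols):
--                     yield [v] + rest
--
--     def search(rows, cols):
--         if len(rows) == N:
--             if sum(row[j] for j, row in enumerate(rows)) == K:
--                 return rows
--             return None
--         for row in gen_rows(0, vals, cols):
--             res = search(rows + [row], [c | {v} for c, v in zip(cols, row)])
--             if res is not None:
--                 return res
--         return None
--
--     rows = search([], [set() for _ in range(N)])
--     if rows is None:
--         return "IMPOSSIBLE"
--     return "POSSIBLE\n" + "\n".join(" ".join(map(str, row)) for row in rows)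
-- ===== Notes on version B (the rewrite author's own statement) =====
-- stated objective: alternative
-- what changed: A enumerates all N! permutations at every search level and filters each whole permutation against the per-column seen sets (kept in a mutated defaultdict plus a preallocated matrix); B generates each candidate row cell by cell, pruning values already used in a column while the row is being built (a lazy generator over pure state), so incompatible rows are never materialized; the enumeration order and hence the first matrix found are identical.
import Mathlib
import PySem

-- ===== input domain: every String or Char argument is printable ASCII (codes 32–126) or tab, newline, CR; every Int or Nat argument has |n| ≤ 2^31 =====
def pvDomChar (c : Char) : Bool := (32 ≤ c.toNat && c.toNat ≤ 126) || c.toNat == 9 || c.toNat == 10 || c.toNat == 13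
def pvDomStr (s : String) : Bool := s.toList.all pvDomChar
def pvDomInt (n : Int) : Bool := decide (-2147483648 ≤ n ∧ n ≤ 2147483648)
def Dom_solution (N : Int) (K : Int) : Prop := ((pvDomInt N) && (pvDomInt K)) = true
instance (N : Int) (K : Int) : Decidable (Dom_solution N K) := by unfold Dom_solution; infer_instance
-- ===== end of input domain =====

-- B replaces A's "generate all N! permutations, then filter each against the column
-- sets" row enumeration by a pruned cell-by-cell row generator over pure state;
-- the search order is unchanged, so the first full matrix found is identical.

-- ===== PORT A =====

-- matrix_to_str: l = []; for row in mat: l.append(" ".join(map(str,row))); "\n".join(l)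
def matrixToStrA (mat : List (List Int)) : String :=
  PySem.Str.join "\n"
    (mat.foldl (fun l row => l ++ [PySem.Str.join " " (row.map PySem.Int.toStr)]) [])

-- itertools.permutations(list(range(1, N+1)))
def permsA (N : Int) : List (List Int) :=
  PySem.List.permutations (PySem.List.pyRange 1 (N + 1)) (PySem.List.pyRange 1 (N + 1)).length

-- all(perm[j] not in seen[j] for j in range(N)); defaultdict lookup = getD with empty set
-- (the defaultdict also inserts an empty set at a missing key j, which changes no value)
def okA (seen : PySem.Dict Int (PySem.Set Int)) (N : Int) (perm : List Int) : Bool :=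
  (PySem.List.pyRange 0 N).all
    (fun j => !((seen.getD j PySem.Set.empty).contains (PySem.List.pyGetD perm j 0)))

-- for j in range(N): seen[j].add(perm[j])
def placeSeenA (seen : PySem.Dict Int (PySem.Set Int)) (N : Int) (perm : List Int) :
    PySem.Dict Int (PySem.Set Int) :=
  (PySem.List.pyRange 0 N).foldl
    (fun d j => d.insert j ((d.getD j PySem.Set.empty).add (PySem.List.pyGetD perm j 0)))
    seen

-- sum(mat[i][i] for i in range(N))
def traceA (mat : List (List Int)) (N : Int) : Int :=
  ((PySem.List.pyRange 0 N).map
    (fun i => PySem.List.pyGetD (PySem.List.pyGetD mat i []) i 0)).sum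

-- dfs(i), state (seen, mat) threaded; the result carries mat so the caller can read it
-- after success, exactly as Python reads the global mat.  The j-loop "mat[i][j] = perm[j]"
-- overwrites every cell of row i (len(perm) == N == len(mat[i])), i.e. it replaces row i
-- by perm: ported as pySetD mat i perm.  The undo loop (seen[j].remove(perm[j]),
-- mat[i][j] = 0) restores exactly the values saved before placement (perm[j] was not in
-- seen[j], and row i was all zeros), so the pure port continues with the saved state.
-- fuel = N - i rows still to fill; the 0/else mismatch case is a totality guard that is
-- never reached when dfs is started as Python starts it (i = 0, fuel = N ≥ 0).
mutual
def dfsA (N K : Int) (fuel : Nat) (i : Int) (seen : PySem.Dict Int (PySem.Set Int))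
    (mat : List (List Int)) : Option (List (List Int)) :=
  if i == N then (if traceA mat N == K then some mat else none)
  else
    match fuel with
    | 0 => none
    | fuel' + 1 => tryRowsA N K fuel' i seen mat (permsA N)
  termination_by (fuel, 0)

def tryRowsA (N K : Int) (fuel : Nat) (i : Int) (seen : PySem.Dict Int (PySem.Set Int))
    (mat : List (List Int)) (perms : List (List Int)) : Option (List (List Int)) :=
  match perms with
  | [] => none
  | perm :: rest =>
    if okA seen N perm then
      match dfsA N K fuel (i + 1) (placeSeenA seen N perm) (PySem.List.pySetD mat i perm) with
      | some m => some m
      | none => tryRowsA N K fuel i seen mat rest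
    else tryRowsA N K fuel i seen mat rest
  termination_by (fuel, perms.length + 1)
end

def solution (N : Int) (K : Int) : String :=
  -- mat = [[0]*N for _ in range(N)]
  match dfsA N K N.toNat 0 PySem.Dict.empty
      ((PySem.List.pyRange 0 N).map (fun _ => List.replicate N.toNat 0)) with
  | some m => "POSSIBLE\n" ++ matrixToStrA m
  | none => "IMPOSSIBLE"

-- ===== PORT B =====

def matrixToStrB (rows : List (List Int)) : String :=
  PySem.Str.join "\n" (rows.map (fun row => PySem.Str.join " " (row.map PySem.Int.toStr)))

-- gen_rows(j, avail, cols): lexicographic rows from the remaining values avail, cell j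
-- onward, pruning v ∈ cols[j] as the row is built.  fuel = len(avail) (totality guard).
def genRowsB (cols : List (PySem.Set Int)) : Nat → Nat → List Int → List (List Int)
  | _, _, [] => [[]]
  | 0, _, _ => []
  | fuel + 1, j, avail =>
    (List.range avail.length).flatMap (fun idx =>
      match avail[idx]? with
      | none => []
      | some v =>
        if (cols.getD j PySem.Set.empty).contains v then []
        else (genRowsB cols fuel (j + 1) (avail.eraseIdx idx)).map (v :: ·))

-- sum(row[j] for j, row in enumerate(rows))
def traceB (rows : List (List Int)) : Int :=
  ((PySem.List.enumerate rows).map (fun jr => PySem.List.pyGetD jr.2 jr.1 0)).sum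

-- search(rows, cols); fuel = N - len(rows) rows still to place (totality guard)
mutual
def searchB (N K : Int) (fuel : Nat) (rows : List (List Int)) (cols : List (PySem.Set Int)) :
    Option (List (List Int)) :=
  if (rows.length : Int) == N then (if traceB rows == K then some rows else none)
  else
    match fuel with
    | 0 => none
    | fuel' + 1 =>
      tryRowsB N K fuel' rows cols
        (genRowsB cols (PySem.List.pyRange 1 (N + 1)).length 0 (PySem.List.pyRange 1 (N + 1)))
  termination_by (fuel, 0)

def tryRowsB (N K : Int) (fuel : Nat) (rows : List (List Int)) (cols : List (PySem.Set Int))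
    (cands : List (List Int)) : Option (List (List Int)) :=
  match cands with
  | [] => none
  | row :: rest =>
    match searchB N K fuel (rows ++ [row]) (List.zipWith (fun c v => c.add v) cols row) with
    | some m => some m
    | none => tryRowsB N K fuel rows cols rest
  termination_by (fuel, cands.length + 1)
end

def solution_alt (N : Int) (K : Int) : String :=
  match searchB N K N.toNat []
      ((PySem.List.pyRange 0 N).map (fun _ => (PySem.Set.empty : PySem.Set Int))) with
  | some rows => "POSSIBLE\n" ++ matrixToStrB rows
  | none => "IMPOSSIBLE"


-- ===== PRECONDITION & SPEC =====
-- Pre_ excludes N < 0, where Python A's dfs recursion never reaches its base case and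
-- raises RecursionError (B recurses forever there too); A returns normally on all N ≥ 0.
def Pre_solution (N : Int) (K : Int) : Prop := 0 ≤ N
instance (N : Int) (K : Int) : Decidable (Pre_solution N K) := by
  unfold Pre_solution; infer_instance

def pvWitness_solution : Int × Int := (2, 4)

def Spec_solution (N : Int) (K : Int) (out : String) : Prop := out = solution_alt N K
instance (N : Int) (K : Int) (out : String) : Decidable (Spec_solution N K out) := by
  unfold Spec_solution; infer_instance

-- ===== CLAIM (what is proved, stated in full; the proofs are below) =====
def Claim_equal_solution : Prop :=
  ∀ (N : Int) (K : Int), Dom_solution N K → Pre_solution N K → Spec_solution N K (solution N K)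

-- ===== LEMMAS AND PROOFS =====

def compatFrom (cols : List (PySem.Set Int)) : Nat → List Int → Bool
  | _, [] => true
  | j, v :: r => !((cols.getD j PySem.Set.empty).contains v) && compatFrom cols (j + 1) r

theorem length_pyRange_vals (n : Nat) :
    (PySem.List.pyRange 1 ((n : Int) + 1)).length = n := by
  simp only [PySem.List.length_pyRange_one, add_sub_cancel_right, Int.toNat_natCast]

theorem genRowsB_eq_filter (cols : List (PySem.Set Int)) :
    ∀ (fuel : Nat) (j : Nat) (avail : List Int), avail.length = fuel →
      genRowsB cols fuel j avail =
        (PySem.List.permutations avail fuel).filter (compatFrom cols j) := by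
  intro fuel
  induction fuel with
  | zero =>
    intro j avail h
    have : avail = [] := List.eq_nil_of_length_eq_zero h
    subst this
    simp [genRowsB, PySem.List.permutations, compatFrom]
  | succ f ih =>
    intro j avail h
    match avail, h with
    | a :: as, h =>
      rw [genRowsB]
      rw [PySem.List.permutations, List.filter_flatMap]
      · apply List.flatMap_congr
        intro i hi
        rw [List.mem_range] at hi
        rw [List.getElem?_eq_getElem hi]
        have hlen : ((a :: as).eraseIdx i).length = f := by
          rw [List.length_eraseIdx_of_lt hi]; omega
        dsimp only
        rw [List.filter_map]
        by_cases hc : (cols.getD j PySem.Set.empty).contains ((a :: as)[i]) = true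
        · rw [if_pos hc]
          have hnil : List.filter (compatFrom cols j ∘ fun x => (a :: as)[i] :: x)
              (PySem.List.permutations ((a :: as).eraseIdx i) f) = [] := by
            apply List.filter_eq_nil_iff.mpr
            intro w _
            simp only [Function.comp_apply, compatFrom, hc, Bool.not_true, Bool.false_and]
            exact Bool.false_ne_true
          rw [hnil, List.map_nil]
        · rw [if_neg hc, ih _ _ hlen]
          congr 1
          apply List.filter_congr
          intro w _
          have hcf : (cols.getD j PySem.Set.empty).contains ((a :: as)[i]) = false :=
            Bool.eq_false_iff.mpr hc
          simp only [Function.comp_apply, compatFrom, hcf, Bool.not_false, Bool.true_and]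
      · simp

theorem all_congr_mem {α : Type} (l : List α) (p q : α → Bool)
    (h : ∀ x ∈ l, p x = q x) : l.all p = l.all q := by
  induction l with
  | nil => rfl
  | cons x xs ih =>
    rw [List.all_cons, List.all_cons, h x (List.mem_cons_self), ih]
    exact fun y hy => h y (List.mem_cons_of_mem _ hy)

theorem allRange_eq_compatFrom (cols : List (PySem.Set Int)) :
    ∀ (p : List Int) (j0 : Nat),
      (List.range p.length).all
        (fun t => !((cols.getD (j0 + t) PySem.Set.empty).contains (p.getD t 0)))
      = compatFrom cols j0 p := by
  intro p
  induction p with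
  | nil => intro j0; simp [compatFrom]
  | cons v r ihp =>
    intro j0
    rw [List.length_cons, List.range_succ_eq_map, List.all_cons, List.all_map]
    have hfun :
        ((fun t => !((cols.getD (j0 + t) PySem.Set.empty).contains ((v :: r).getD t 0)))
          ∘ Nat.succ)
        = (fun t => !((cols.getD ((j0 + 1) + t) PySem.Set.empty).contains (r.getD t 0))) := by
      funext t
      have harg : j0 + (t + 1) = (j0 + 1) + t := by omega
      simp [Function.comp, harg]
    rw [hfun, ihp (j0 + 1)]
    simp [compatFrom]

theorem okA_eq_compatFrom (n : Nat) (seen : PySem.Dict Int (PySem.Set Int))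
    (cols : List (PySem.Set Int))
    (hsc : ∀ j : Nat, j < n → seen.getD (j : Int) PySem.Set.empty = cols.getD j PySem.Set.empty)
    (p : List Int) (hp : p.length = n) :
    okA seen (n : Int) p = compatFrom cols 0 p := by
  unfold okA
  rw [PySem.List.pyRange_zero_natCast, List.all_map]
  have h1 : ∀ t ∈ List.range n,
      ((fun j => !((seen.getD j PySem.Set.empty).contains (PySem.List.pyGetD p j 0)))
        ∘ (fun k : Nat => (k : Int))) t
      = (fun t => !((cols.getD (0 + t) PySem.Set.empty).contains (p.getD t 0))) t := by
    intro t ht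
    rw [List.mem_range] at ht
    simp only [Function.comp_apply, PySem.List.pyGetD_natCast, hsc t ht, Nat.zero_add]
  rw [all_congr_mem _ _ _ h1, ← hp, allRange_eq_compatFrom]

theorem foldl_insert_add_getD (g : Int → Int) :
    ∀ (J : List Int), J.Nodup → ∀ (d : PySem.Dict Int (PySem.Set Int)) (j : Int),
      (J.foldl (fun d j' => d.insert j' ((d.getD j' PySem.Set.empty).add (g j'))) d).getD
          j PySem.Set.empty
      = if j ∈ J then (d.getD j PySem.Set.empty).add (g j)
        else d.getD j PySem.Set.empty := by
  intro J
  induction J with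
  | nil => intro _ d j; simp
  | cons j0 rest ih =>
    intro hnd d j
    obtain ⟨h0, h1⟩ := List.nodup_cons.mp hnd
    rw [List.foldl_cons, ih h1]
    by_cases hjr : j ∈ rest
    · have hne : j ≠ j0 := fun e => h0 (e ▸ hjr)
      rw [if_pos hjr, if_pos (List.mem_cons_of_mem _ hjr),
        PySem.Dict.getD_insert, if_neg hne]
    · rw [if_neg hjr, PySem.Dict.getD_insert]
      by_cases hj0 : j = j0
      · rw [if_pos hj0, if_pos (by simp [hj0]), hj0]
      · rw [if_neg hj0, if_neg (by simp [hj0, hjr])]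

theorem placeSeenA_getD (n : Nat) (seen : PySem.Dict Int (PySem.Set Int)) (p : List Int)
    (j : Nat) (hj : j < n) :
    (placeSeenA seen (n : Int) p).getD (j : Int) PySem.Set.empty
      = (seen.getD (j : Int) PySem.Set.empty).add (PySem.List.pyGetD p (j : Int) 0) := by
  have hnd : (PySem.List.pyRange 0 (n : Int)).Nodup := by
    rw [PySem.List.pyRange_zero_natCast]
    exact List.nodup_range.map (fun a b h => by exact_mod_cast h)
  have := foldl_insert_add_getD (fun j' => PySem.List.pyGetD p j' 0)
    (PySem.List.pyRange 0 (n : Int)) hnd seen (j : Int)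
  unfold placeSeenA
  rw [this, if_pos (PySem.List.mem_pyRange_one.mpr ⟨by omega, by exact_mod_cast hj⟩)]

theorem zipWith_add_getD (cols : List (PySem.Set Int)) (row : List Int) (j : Nat)
    (hj : j < cols.length) (hl : cols.length = row.length) :
    (List.zipWith (fun c v => c.add v) cols row).getD j PySem.Set.empty
      = (cols.getD j PySem.Set.empty).add (row.getD j 0) := by
  have hz : j < (List.zipWith (fun c v => PySem.Set.add c v) cols row).length := by
    rw [List.length_zipWith]; omega
  rw [List.getD_eq_getElem _ _ hz, List.getElem_zipWith,
    List.getD_eq_getElem _ _ hj, List.getD_eq_getElem _ _ (by omega)]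

theorem matSet_step (n : Nat) (rows mat : List (List Int)) (p : List Int)
    (hlt : rows.length < n)
    (hmat : mat = rows ++ List.replicate (n - rows.length) (List.replicate n 0)) :
    PySem.List.pySetD mat (rows.length : Int) p
      = (rows ++ [p]) ++ List.replicate (n - (rows ++ [p]).length) (List.replicate n 0) := by
  have hml : mat.length = n := by
    rw [hmat, List.length_append, List.length_replicate]; omega
  have hrep : n - rows.length = (n - (rows.length + 1)) + 1 := by omega
  unfold PySem.List.pySetD
  rw [PySem.List.pySet?_natCast _ _ _ (by omega), Option.getD_some, hmat, hrep,
    List.replicate_succ, List.set_append, if_neg (by omega)]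
  simp

theorem trace_eq (n : Nat) (rows : List (List Int)) (h : rows.length = n) :
    traceA rows (n : Int) = traceB rows := by
  unfold traceA traceB
  rw [PySem.List.enumerate_eq_map_pyRange (d := []), List.map_map]
  rw [show PySem.List.len rows = (n : Int) from by simp [PySem.List.len, h]]
  rfl

theorem permsA_length (n : Nat) : ∀ p ∈ permsA (n : Int), p.length = n := by
  intro p hp
  unfold permsA at hp
  have := PySem.List.perm_of_mem_permutations hp
  rw [this.length_eq, length_pyRange_vals]

theorem mainSim (K : Int) (n : Nat) :
    ∀ (fuel : Nat) (rows : List (List Int)) (cols : List (PySem.Set Int))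
      (seen : PySem.Dict Int (PySem.Set Int)) (mat : List (List Int)),
      rows.length ≤ n →
      cols.length = n →
      (∀ j : Nat, j < n →
        seen.getD (j : Int) PySem.Set.empty = cols.getD j PySem.Set.empty) →
      mat = rows ++ List.replicate (n - rows.length) (List.replicate n 0) →
      dfsA (n : Int) K fuel (rows.length : Int) seen mat = searchB (n : Int) K fuel rows cols := by
  intro fuel
  induction fuel with
  | zero =>
    intro rows cols seen mat hle hcl hsc hmat
    rw [dfsA, searchB]
    by_cases hb : ((rows.length : Int) == (n : Int)) = true
    · have hlen : rows.length = n := by simpa using hb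
      have hmr : mat = rows := by rw [hmat, hlen]; simp
      rw [if_pos hb, if_pos hb, hmr, trace_eq n rows hlen]
    · rw [if_neg hb, if_neg hb]
  | succ f ih =>
    intro rows cols seen mat hle hcl hsc hmat
    rw [dfsA, searchB]
    by_cases hb : ((rows.length : Int) == (n : Int)) = true
    · have hlen : rows.length = n := by simpa using hb
      have hmr : mat = rows := by rw [hmat, hlen]; simp
      rw [if_pos hb, if_pos hb, hmr, trace_eq n rows hlen]
    · rw [if_neg hb, if_neg hb]
      have hlt : rows.length < n := by
        rcases Nat.lt_or_ge rows.length n with h | h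
        · exact h
        · exact absurd (by simp [Nat.le_antisymm hle h]) hb
      rw [length_pyRange_vals, genRowsB_eq_filter cols n 0 _ (length_pyRange_vals n)]
      have hperm : permsA (n : Int)
          = PySem.List.permutations (PySem.List.pyRange 1 ((n : Int) + 1)) n := by
        unfold permsA; rw [length_pyRange_vals]
      rw [← hperm]
      suffices hloop : ∀ ps : List (List Int), (∀ p ∈ ps, p.length = n) →
          tryRowsA (n : Int) K f (rows.length : Int) seen mat ps
            = tryRowsB (n : Int) K f rows cols (ps.filter (compatFrom cols 0)) by
        exact hloop _ (permsA_length n)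
      intro ps
      induction ps with
      | nil => intro _; rw [tryRowsA, List.filter_nil, tryRowsB]
      | cons p ps' ihp =>
        intro hmem
        have hplen : p.length = n := hmem p List.mem_cons_self
        have hok : okA seen (n : Int) p = compatFrom cols 0 p :=
          okA_eq_compatFrom n seen cols hsc p hplen
        rw [tryRowsA]
        by_cases hcp : compatFrom cols 0 p = true
        · rw [if_pos (hok.trans hcp), List.filter_cons_of_pos hcp, tryRowsB]
          have hrec : dfsA (n : Int) K f ((rows.length : Int) + 1)
                (placeSeenA seen (n : Int) p) (PySem.List.pySetD mat (rows.length : Int) p)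
              = searchB (n : Int) K f (rows ++ [p])
                (List.zipWith (fun c v => c.add v) cols p) := by
            have h1 : (rows ++ [p]).length ≤ n := by simp; omega
            have h2 : (List.zipWith (fun c v => PySem.Set.add c v) cols p).length = n := by
              rw [List.length_zipWith]; omega
            have h3 : ∀ j : Nat, j < n →
                (placeSeenA seen (n : Int) p).getD (j : Int) PySem.Set.empty
                  = (List.zipWith (fun c v => PySem.Set.add c v) cols p).getD j
                      PySem.Set.empty := by
              intro j hj
              rw [placeSeenA_getD n seen p j hj,
                zipWith_add_getD cols p j (by omega) (by omega), hsc j hj,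
                PySem.List.pyGetD_natCast]
            have h4 := matSet_step n rows mat p hlt hmat
            have := ih (rows ++ [p]) (List.zipWith (fun c v => PySem.Set.add c v) cols p)
              (placeSeenA seen (n : Int) p)
              (PySem.List.pySetD mat (rows.length : Int) p) h1 h2 h3 h4
            have hidx : (((rows ++ [p]).length : Nat) : Int) = (rows.length : Int) + 1 := by
              simp
            rw [hidx] at this
            exact this
          rw [hrec]
          cases hsb : searchB (n : Int) K f (rows ++ [p])
              (List.zipWith (fun c v => c.add v) cols p) with
          | some m => rfl
          | none =>
            exact ihp (fun q hq => hmem q (List.mem_cons_of_mem _ hq))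
        · have hokf : okA seen (n : Int) p = false := by
            rw [hok]; exact Bool.eq_false_iff.mpr hcp
          rw [if_neg (by rw [hokf]; exact Bool.false_ne_true),
            List.filter_cons_of_neg (by simpa using hcp)]
          exact ihp (fun q hq => hmem q (List.mem_cons_of_mem _ hq))

theorem matrixToStr_eq (m : List (List Int)) : matrixToStrA m = matrixToStrB m := by
  unfold matrixToStrA matrixToStrB
  rw [PySem.List.foldl_append_singleton_eq_map, List.nil_append]

theorem solution_eq (N K : Int) (hpre : 0 ≤ N) : solution N K = solution_alt N K := by
  obtain ⟨n, rfl⟩ : ∃ n : Nat, N = (n : Int) := ⟨N.toNat, (Int.toNat_of_nonneg hpre).symm⟩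
  unfold solution solution_alt
  have hcols0 : ((PySem.List.pyRange 0 (n : Int)).map
      (fun _ => (PySem.Set.empty : PySem.Set Int)))
      = List.replicate n (PySem.Set.empty : PySem.Set Int) := by
    rw [PySem.List.pyRange_zero_natCast, List.map_map]
    exact (List.map_const').trans (by rw [List.length_range]; rfl)
  have hmat0 : ((PySem.List.pyRange 0 (n : Int)).map
      (fun _ => List.replicate ((n : Int)).toNat 0))
      = List.replicate n (List.replicate n (0 : Int)) := by
    rw [PySem.List.pyRange_zero_natCast, List.map_map, Int.toNat_natCast]
    exact (List.map_const').trans (by rw [List.length_range])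
  rw [hcols0, hmat0]
  have hmain := mainSim K n n [] (List.replicate n PySem.Set.empty) PySem.Dict.empty
    (List.replicate n (List.replicate n (0 : Int)))
    (by simp) (by simp)
    (by
      intro j hj
      rw [PySem.Dict.getD_empty, List.getD_eq_getElem _ _ (by simpa using hj),
        List.getElem_replicate])
    (by simp)
  simp only [List.length_nil, Nat.cast_zero] at hmain
  rw [Int.toNat_natCast, hmain]
  cases searchB (n : Int) K n [] (List.replicate n PySem.Set.empty) with
  | some m => simp [matrixToStr_eq]
  | none => rfl

-- ===== VERDICT (by name: the statement is the Claim_ definition above) =====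
theorem solution_spec : Claim_equal_solution := by
  intro N K _ hpre
  unfold Spec_solution
  exact solution_eq N K hpre
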